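-- pv_equiv track=rewrite | github.com/kiboschool/log-analyzer | log_analyzer.py | failure_map
-- ===== SOURCE A (Python) =====
-- def failure_map(log_lines):
--     result_map = {
--         "Performance": 0,
--         "Functional": 0,
--         "System": 0
--     }
--     for test_line in log_lines:
--         if "FAIL" in test_line:
--             if "Performance" in test_line:
--                 result_map["Performance"] += 1
--             elif "Functional" in test_line:
--                 result_map["Functional"] += 1
--             else:
--                 result_map["System"] += 1
--
--     return result_map
-- ===== SOURCE B (Python) =====
-- def failure_map(log_lines):
--     fails = [l for l in log_lines if "FAIL" in l]
--     perf = sum("Performance" in l for l in fails)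
--     func = sum("Performance" not in l and "Functional" in l for l in fails)
--     system = len(fails) - perf - func
--     return {"Performance": perf, "Functional": func, "System": system}
-- ===== Notes on version B (the rewrite author's own statement) =====
-- stated objective: alternative
-- what changed: Replaces the per-line dict-dispatch loop with a filter of the FAIL lines followed by separate counting passes, computing the System count as the residual len(fails) - perf - func.
import Mathlib
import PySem

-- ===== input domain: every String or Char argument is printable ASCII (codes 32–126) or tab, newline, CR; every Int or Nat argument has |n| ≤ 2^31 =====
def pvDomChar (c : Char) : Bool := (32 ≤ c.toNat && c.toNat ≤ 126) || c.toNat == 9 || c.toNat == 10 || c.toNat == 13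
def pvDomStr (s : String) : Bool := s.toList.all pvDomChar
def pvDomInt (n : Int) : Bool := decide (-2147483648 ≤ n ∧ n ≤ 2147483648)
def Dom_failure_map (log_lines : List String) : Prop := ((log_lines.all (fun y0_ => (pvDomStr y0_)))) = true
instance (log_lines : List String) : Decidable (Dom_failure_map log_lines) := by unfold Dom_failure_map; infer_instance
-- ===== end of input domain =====

-- B replaces the per-line dict-dispatch loop with a filter of the FAIL lines plus separate
-- counting passes, getting the System count by subtraction (alternative decomposition, same cost).

-- ===== PORT A =====
-- loop body: the per-line dict dispatch of A
def failureStepA (d : PySem.Dict String Int) (test_line : String) : PySem.Dict String Int :=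
  if PySem.Str.isIn "FAIL" test_line then
    if PySem.Str.isIn "Performance" test_line then
      d.modify "Performance" 0 (· + 1)
    else if PySem.Str.isIn "Functional" test_line then
      d.modify "Functional" 0 (· + 1)
    else
      d.modify "System" 0 (· + 1)
  else d

def failure_map (log_lines : List String) : List (String × Int) :=
  (log_lines.foldl failureStepA
    (PySem.Dict.mk [("Performance", 0), ("Functional", 0), ("System", 0)])).items

-- ===== PORT B =====
def failure_map_alt (log_lines : List String) : List (String × Int) :=
  let fails := log_lines.filter (fun l => PySem.Str.isIn "FAIL" l)
  let perf : Int := (fails.filter (fun l => PySem.Str.isIn "Performance" l)).length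
  let func : Int := (fails.filter (fun l =>
      !PySem.Str.isIn "Performance" l && PySem.Str.isIn "Functional" l)).length
  let system : Int := (fails.length : Int) - perf - func
  [("Performance", perf), ("Functional", func), ("System", system)]

-- ===== PRECONDITION & SPEC =====
def Spec_failure_map (log_lines : List String) (out : List (String × Int)) : Prop := out = failure_map_alt log_lines
instance (log_lines : List String) (out : List (String × Int)) : Decidable (Spec_failure_map log_lines out) := by unfold Spec_failure_map; infer_instance

-- ===== CLAIM (what is proved, stated in full; the proofs are below) =====
def Claim_equal_failure_map : Prop := ∀ (log_lines : List String), Dom_failure_map log_lines → Spec_failure_map log_lines (failure_map log_lines)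

-- ===== LEMMAS AND PROOFS =====

-- predicates for the three disjoint classes of FAIL lines
def isPerf (l : String) : Bool := PySem.Str.isIn "FAIL" l && PySem.Str.isIn "Performance" l
def isFunc (l : String) : Bool :=
  PySem.Str.isIn "FAIL" l && !PySem.Str.isIn "Performance" l && PySem.Str.isIn "Functional" l
def isSys (l : String) : Bool :=
  PySem.Str.isIn "FAIL" l && !PySem.Str.isIn "Performance" l && !PySem.Str.isIn "Functional" l

-- A's fold from an arbitrary 3-entry start adds the three class counts
theorem foldl_stepA (ls : List String) : ∀ (p f s : Int),
    ls.foldl failureStepA (PySem.Dict.mk [("Performance", p), ("Functional", f), ("System", s)]) =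
      PySem.Dict.mk
      [("Performance", p + (ls.countP (isPerf ·)) ),
       ("Functional", f + (ls.countP (isFunc ·)) ),
       ("System", s + (ls.countP (isSys ·)) )] := by
  induction ls with
  | nil => intro p f s; simp
  | cons hd tl ih =>
    intro p f s
    simp only [List.foldl_cons, failureStepA, List.countP_cons]
    by_cases hF : PySem.Str.isIn "FAIL" hd <;>
      by_cases hP : PySem.Str.isIn "Performance" hd <;>
        by_cases hFn : PySem.Str.isIn "Functional" hd <;>
          (simp at hF hP hFn <;> try skip) <;>
          simp [hF, hP, hFn, PySem.Dict.modify, PySem.Dict.contains, PySem.Dict.insert, PySem.Dict.getD, PySem.Dict.get?, isPerf, isFunc, isSys, ih,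
            List.countP_cons] <;> (try omega)

-- the FAIL lines split exactly into the three classes (as Int lengths)
theorem fail_split (ls : List String) :
    ((ls.filter (fun l => PySem.Str.isIn "FAIL" l)).length : Int) =
      (ls.countP (isPerf ·)) + (ls.countP (isFunc ·)) + (ls.countP (isSys ·)) := by
  induction ls with
  | nil => simp
  | cons hd tl ih =>
    simp [isPerf, isFunc, isSys] at ih
    by_cases hF : PySem.Str.isIn "FAIL" hd <;>
      by_cases hP : PySem.Str.isIn "Performance" hd <;>
        by_cases hFn : PySem.Str.isIn "Functional" hd <;>
          (simp at hF hP hFn <;> try skip) <;>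
          simp [hF, hP, hFn, isPerf, isFunc, isSys, List.countP_cons, List.filter_cons, ih] <;>
            omega

-- B's two filtered counts are the class counts
theorem perf_count (ls : List String) :
    ((ls.filter (fun l => PySem.Str.isIn "FAIL" l)).filter
        (fun l => PySem.Str.isIn "Performance" l)).length = ls.countP (isPerf ·) := by
  rw [List.filter_filter, List.countP_eq_length_filter]
  apply congrArg List.length
  apply List.filter_congr
  intro l _; simp [isPerf, Bool.and_comm]

theorem func_count (ls : List String) :
    ((ls.filter (fun l => PySem.Str.isIn "FAIL" l)).filter
        (fun l => !PySem.Str.isIn "Performance" l && PySem.Str.isIn "Functional" l)).length =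
      ls.countP (isFunc ·) := by
  rw [List.filter_filter, List.countP_eq_length_filter]
  apply congrArg List.length
  apply List.filter_congr
  intro l _
  simp only [isFunc]
  generalize PySem.Str.isIn "FAIL" l = a
  generalize PySem.Str.isIn "Performance" l = b
  generalize PySem.Str.isIn "Functional" l = c
  cases a <;> cases b <;> cases c <;> rfl

-- ===== VERDICT (by name: the statement is the Claim_ definition above) =====
theorem failure_map_spec : Claim_equal_failure_map := by
  intro ls _
  show failure_map ls = failure_map_alt ls
  simp only [failure_map, failure_map_alt, foldl_stepA, perf_count, func_count, fail_split]
  ring_nf
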